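-- pv_equiv track=rewrite | github.com/kapikantzari/segmentation-evaluation | segmentation-evaluation.py | __valid_metrics
-- ===== SOURCE A (Python) =====
-- def __valid_metrics(metrics_input):
--     """
--     Check the validity of the input for computing performance metrics.
--     """
--
--     if (len(metrics_input) == 0):
--         return None
--     else:
--         metrics = {"acc": 0, "dice": 1, "hausdorff": 2, "iou": 3, "mcc": 4}
--         metrics_indicator = [0, 0, 0, 0, 0]
--         for metric in metrics_input:
--             if (metric in metrics):
--                 metrics_indicator[metrics[metric]] = 1
--             else:
--                 return None
--         return metrics_indicator
-- ===== SOURCE B (Python) =====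
-- def __valid_metrics(metrics_input):
--     """
--     Check the validity of the input for computing performance metrics.
--     """
--     if len(metrics_input) == 0:
--         return None
--     names = ["acc", "dice", "hausdorff", "iou", "mcc"]
--     present = set(metrics_input)
--     if not present.issubset(names):
--         return None
--     return [1 if m in present else 0 for m in names]
-- ===== Notes on version B (the rewrite author's own statement) =====
-- stated objective: idiomatic
-- what changed: B validates the whole input with one subset test over set(metrics_input) and builds the indicator by iterating over the five canonical metric names (membership test) instead of looping over the input with early returns and in-place index assignment.
import Mathlib
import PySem

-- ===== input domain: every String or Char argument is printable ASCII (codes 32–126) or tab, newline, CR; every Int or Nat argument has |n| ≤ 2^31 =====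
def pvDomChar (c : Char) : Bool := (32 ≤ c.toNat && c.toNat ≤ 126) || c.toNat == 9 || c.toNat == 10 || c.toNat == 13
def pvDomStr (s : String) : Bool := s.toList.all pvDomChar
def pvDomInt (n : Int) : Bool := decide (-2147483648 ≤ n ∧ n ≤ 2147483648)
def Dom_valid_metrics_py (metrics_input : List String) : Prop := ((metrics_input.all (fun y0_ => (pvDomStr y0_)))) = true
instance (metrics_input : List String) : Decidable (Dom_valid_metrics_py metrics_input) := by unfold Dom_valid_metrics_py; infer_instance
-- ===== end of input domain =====

-- B validates with one subset test on set(metrics_input) and builds the indicator by iterating over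
-- the five canonical names instead of looping over the input with early returns (objective: idiomatic).

-- ===== PORT A =====
def pvMetricsDict : PySem.Dict String Int :=
  PySem.Dict.mk [("acc", 0), ("dice", 1), ("hausdorff", 2), ("iou", 3), ("mcc", 4)]

def valid_metrics_loop (ms : List String) (ind : List Int) : Option (List Int) :=
  match ms with
  | [] => some ind
  | m :: rest =>
    match PySem.Dict.get? pvMetricsDict m with
    | some i => valid_metrics_loop rest (PySem.List.pySetD ind i 1)
    | none => none

def valid_metrics_py (metrics_input : List String) : Option (List Int) :=
  if metrics_input.length = 0 then none
  else valid_metrics_loop metrics_input [0, 0, 0, 0, 0]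

-- ===== PORT B =====
def pvMetricNames : List String := ["acc", "dice", "hausdorff", "iou", "mcc"]

def valid_metrics_py_alt (metrics_input : List String) : Option (List Int) :=
  if metrics_input.length = 0 then none
  else
    let present : PySem.Set String := PySem.Set.ofList metrics_input
    if PySem.Set.issubset present pvMetricNames then
      some (pvMetricNames.map (fun m => if PySem.Set.contains present m then (1 : Int) else 0))
    else none

-- ===== PRECONDITION & SPEC =====
def Spec_valid_metrics_py (metrics_input : List String) (out : Option (List Int)) : Prop := out = valid_metrics_py_alt metrics_input
instance (metrics_input : List String) (out : Option (List Int)) : Decidable (Spec_valid_metrics_py metrics_input out) := by unfold Spec_valid_metrics_py; infer_instance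

-- ===== CLAIM (what is proved, stated in full; the proofs are below) =====
def Claim_equal_valid_metrics_py : Prop := ∀ (metrics_input : List String), Dom_valid_metrics_py metrics_input → Spec_valid_metrics_py metrics_input (valid_metrics_py metrics_input)

-- ===== LEMMAS AND PROOFS =====

-- Lookup in the literal metrics dict fails exactly off the five names.
theorem pvMetricsDict_get?_none (x : String) (h1 : x ≠ "acc") (h2 : x ≠ "dice")
    (h3 : x ≠ "hausdorff") (h4 : x ≠ "iou") (h5 : x ≠ "mcc") :
    PySem.Dict.get? pvMetricsDict x = none := by
  have b1 : ("acc" == x) = false := by simp [Ne.symm h1]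
  have b2 : ("dice" == x) = false := by simp [Ne.symm h2]
  have b3 : ("hausdorff" == x) = false := by simp [Ne.symm h3]
  have b4 : ("iou" == x) = false := by simp [Ne.symm h4]
  have b5 : ("mcc" == x) = false := by simp [Ne.symm h5]
  simp [pvMetricsDict, b1, b2, b3, b4, b5, PySem.Dict.get?]

-- Characterisation of A's loop when every element is one of the five names.
theorem valid_metrics_loop_char (ms : List String) (a b c d e : Int)
    (h : ∀ m ∈ ms, m ∈ pvMetricNames) :
    valid_metrics_loop ms [a, b, c, d, e] =
      some [if "acc" ∈ ms then 1 else a, if "dice" ∈ ms then 1 else b,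
            if "hausdorff" ∈ ms then 1 else c, if "iou" ∈ ms then 1 else d,
            if "mcc" ∈ ms then 1 else e] := by
  induction ms generalizing a b c d e with
  | nil => simp [valid_metrics_loop]
  | cons m rest ih =>
    have hm : m ∈ pvMetricNames := h m (List.mem_cons_self ..)
    have hrest : ∀ x ∈ rest, x ∈ pvMetricNames := fun x hx => h x (List.mem_cons_of_mem _ hx)
    simp only [pvMetricNames, List.mem_cons, List.not_mem_nil, or_false] at hm
    rcases hm with h1 | h1 | h1 | h1 | h1 <;> subst h1
    · simp only [valid_metrics_loop, show PySem.Dict.get? pvMetricsDict "acc" = some 0 from rfl,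
        show PySem.List.pySetD [a, b, c, d, e] (0 : Int) (1 : Int) = [1, b, c, d, e] from by
          simp [PySem.List.pySetD, PySem.List.pySet?, PySem.List.pyIdx?]]
      rw [ih _ _ _ _ _ hrest]
      simp [List.mem_cons]
    · simp only [valid_metrics_loop, show PySem.Dict.get? pvMetricsDict "dice" = some 1 from rfl,
        show PySem.List.pySetD [a, b, c, d, e] (1 : Int) (1 : Int) = [a, 1, c, d, e] from by
          simp [PySem.List.pySetD, PySem.List.pySet?, PySem.List.pyIdx?]]
      rw [ih _ _ _ _ _ hrest]
      simp [List.mem_cons]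
    · simp only [valid_metrics_loop,
        show PySem.Dict.get? pvMetricsDict "hausdorff" = some 2 from rfl,
        show PySem.List.pySetD [a, b, c, d, e] (2 : Int) (1 : Int) = [a, b, 1, d, e] from by
          simp [PySem.List.pySetD, PySem.List.pySet?, PySem.List.pyIdx?]]
      rw [ih _ _ _ _ _ hrest]
      simp [List.mem_cons]
    · simp only [valid_metrics_loop, show PySem.Dict.get? pvMetricsDict "iou" = some 3 from rfl,
        show PySem.List.pySetD [a, b, c, d, e] (3 : Int) (1 : Int) = [a, b, c, 1, e] from by
          simp [PySem.List.pySetD, PySem.List.pySet?, PySem.List.pyIdx?]]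
      rw [ih _ _ _ _ _ hrest]
      simp [List.mem_cons]
    · simp only [valid_metrics_loop, show PySem.Dict.get? pvMetricsDict "mcc" = some 4 from rfl,
        show PySem.List.pySetD [a, b, c, d, e] (4 : Int) (1 : Int) = [a, b, c, d, 1] from by
          simp [PySem.List.pySetD, PySem.List.pySet?, PySem.List.pyIdx?]]
      rw [ih _ _ _ _ _ hrest]
      simp [List.mem_cons]

-- If some element is not one of the five names, A's loop returns none.
theorem valid_metrics_loop_none (ms : List String) (ind : List Int)
    (h : ∃ m ∈ ms, m ∉ pvMetricNames) :
    valid_metrics_loop ms ind = none := by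
  induction ms generalizing ind with
  | nil => simp at h
  | cons m rest ih =>
    rcases h with ⟨x, hx, hnx⟩
    simp only [pvMetricNames, List.mem_cons, List.not_mem_nil, or_false] at hnx
    push_neg at hnx
    obtain ⟨h1, h2, h3, h4, h5⟩ := hnx
    rcases List.mem_cons.mp hx with rfl | hx'
    · rw [valid_metrics_loop, pvMetricsDict_get?_none x h1 h2 h3 h4 h5]
    · rw [valid_metrics_loop]
      cases hget : PySem.Dict.get? pvMetricsDict m with
      | none => rfl
      | some i =>
        exact ih _ ⟨x, hx', by simp [pvMetricNames, h1, h2, h3, h4, h5]⟩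

-- ===== VERDICT (by name: the statement is the Claim_ definition above) =====
theorem valid_metrics_py_spec : Claim_equal_valid_metrics_py := by
  intro ms _
  unfold Spec_valid_metrics_py valid_metrics_py valid_metrics_py_alt
  by_cases hlen : ms.length = 0
  · simp [hlen]
  · simp only [hlen, if_false]
    by_cases hall : ∀ m ∈ ms, m ∈ pvMetricNames
    · have hsub : PySem.Set.issubset (PySem.Set.ofList ms) pvMetricNames = true := by
        rw [PySem.Set.issubset_iff]
        intro x hx
        exact hall x ((PySem.Set.mem_ofList ms x).mp hx)
      rw [valid_metrics_loop_char ms 0 0 0 0 0 hall]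
      have hc : ∀ s : String,
          (if PySem.Set.contains (PySem.Set.ofList ms) s = true then (1 : Int) else 0) =
            (if s ∈ ms then (1 : Int) else 0) := by
        intro s
        by_cases hs : s ∈ ms <;>
          simp [PySem.Set.contains, PySem.Set.mem_ofList, hs]
      simp only [pvMetricNames] at hsub
      simp only [hsub, if_true, pvMetricNames, List.map, hc]
    · push_neg at hall
      have hsub : PySem.Set.issubset (PySem.Set.ofList ms) pvMetricNames = false := by
        rcases hall with ⟨x, hx, hnx⟩
        rw [Bool.eq_false_iff]
        intro h
        exact hnx (PySem.Set.issubset_iff _ _ |>.mp h x ((PySem.Set.mem_ofList ms x).mpr hx))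
      rw [valid_metrics_loop_none ms _ (by exact_mod_cast hall)]
      simp [hsub]
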